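-- pv_equiv track=rewrite | github.com/linzer0/Bot-For-Eljur | Source/Bot.py | chek
-- ===== SOURCE A (Python) =====
-- def chek(str):
--     digitcount=0
--     charcounter=0
--     for i in str:
--         if(i.isdigit()==True):
--             digitcount=1;
--         elif(i.isalpha()==True):
--             charcounter=1
--     if(digitcount==1 & charcounter==1):
--         return True
--     else:
--         return False
-- ===== SOURCE B (Python) =====
-- def chek(str):
--     return any(c.isdigit() for c in str) and any(c.isalpha() for c in str)
-- ===== Notes on version B (the rewrite author's own statement) =====
-- stated objective: idiomatic
-- what changed: Replaced the single fused loop that maintains two integer flags (and the chained-comparison final test) with two independent short-circuiting existence scans via any().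
import Mathlib
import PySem

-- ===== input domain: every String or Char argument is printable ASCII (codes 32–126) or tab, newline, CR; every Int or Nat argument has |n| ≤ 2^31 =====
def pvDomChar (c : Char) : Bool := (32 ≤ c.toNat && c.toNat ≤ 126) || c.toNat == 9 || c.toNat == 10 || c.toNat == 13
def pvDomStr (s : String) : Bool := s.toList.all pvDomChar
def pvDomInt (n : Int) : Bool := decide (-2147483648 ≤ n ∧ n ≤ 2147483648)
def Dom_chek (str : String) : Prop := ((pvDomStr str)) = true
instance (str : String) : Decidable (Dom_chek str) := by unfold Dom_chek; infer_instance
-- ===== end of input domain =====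

-- B replaces A's single fused flag-maintaining loop by two independent short-circuiting
-- existence scans (any digit, then any letter); same results, more idiomatic.


-- ===== PORT A =====
-- the for-loop: state (digitcount, charcounter), branches in A's order
def chekLoop : List Char → Int → Int → Int × Int
  | [], digitcount, charcounter => (digitcount, charcounter)
  | i :: rest, digitcount, charcounter =>
    if PySem.Chars.isdigit i = true then chekLoop rest 1 charcounter
    else if PySem.Chars.isalpha i = true then chekLoop rest digitcount 1
    else chekLoop rest digitcount charcounter

def chek (str : String) : Bool :=
  let p := chekLoop str.toList 0 0
  -- Python's `digitcount==1 & charcounter==1` is the chained comparison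
  -- digitcount == (1 & charcounter) == 1 (`&` binds tighter than `==`)
  if p.1 = (Int.land 1 p.2) ∧ (Int.land 1 p.2) = 1 then true else false

-- ===== PORT B =====
def chek_alt (str : String) : Bool :=
  str.toList.any PySem.Chars.isdigit && str.toList.any PySem.Chars.isalpha

-- ===== PRECONDITION & SPEC =====
def Spec_chek (str : String) (out : Bool) : Prop := out = chek_alt str
instance (str : String) (out : Bool) : Decidable (Spec_chek str out) := by unfold Spec_chek; infer_instance

-- ===== CLAIM (what is proved, stated in full; the proofs are below) =====
def Claim_equal_chek : Prop := ∀ (str : String), Dom_chek str → Spec_chek str (chek str)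

-- ===== LEMMAS AND PROOFS =====

-- a Python character is never both a digit and a letter
lemma not_digit_and_alpha (x : Char) (h : PySem.Chars.isdigit x = true) :
    PySem.Chars.isalpha x = false := by
  simp [PySem.Chars.isdigit, PySem.Chars.isalpha, PySem.Chars.isupper, PySem.Chars.islower,
    Char.le_def, UInt32.le_iff_toNat_le] at *
  omega

-- closed form of A's loop: each flag becomes 1 iff its branch ever fires
lemma chekLoop_spec (l : List Char) (d c : Int) :
    chekLoop l d c =
      ((if l.any PySem.Chars.isdigit then 1 else d),
       (if l.any PySem.Chars.isalpha then 1 else c)) := by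
  induction l generalizing d c with
  | nil => simp [chekLoop]
  | cons x rest ih =>
    by_cases hd : PySem.Chars.isdigit x = true
    · simp [chekLoop, hd, not_digit_and_alpha x hd, ih]
    · by_cases ha : PySem.Chars.isalpha x = true
      · simp [chekLoop, hd, ha, ih]
      · simp [chekLoop, hd, ha, ih]

-- ===== VERDICT (by name: the statement is the Claim_ definition above) =====
theorem chek_spec : Claim_equal_chek := by
  intro str _
  unfold Spec_chek chek chek_alt
  rw [chekLoop_spec]
  by_cases h1 : str.toList.any PySem.Chars.isdigit <;>
    by_cases h2 : str.toList.any PySem.Chars.isalpha <;>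
      simp [h1, h2] <;> decide
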